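-- pv_equiv track=rewrite | github.com/jooho-le/WelFaren | backend/app/services/finance_recommendation.py | _index_options
-- ===== SOURCE A (Python) =====
-- from typing import Dict, List, Optional
--
-- def _index_options(option_list: List[Dict]) -> Dict[str, List[Dict]]:
--     mapping: Dict[str, List[Dict]] = {}
--     for opt in option_list:
--         prod = opt.get("fin_prdt_cd")
--         if not prod:
--             continue
--         mapping.setdefault(prod, []).append(opt)
--     return mapping
-- ===== SOURCE B (Python) =====
-- from typing import Dict, List
--
--
-- def _index_options(option_list: List[Dict]) -> Dict[str, List[Dict]]:
--     keyed = [(opt.get("fin_prdt_cd"), opt) for opt in option_list]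
--     keys = list(dict.fromkeys(k for k, _ in keyed if k))
--     return {k: [opt for kk, opt in keyed if kk == k] for k in keys}
-- ===== Notes on version B (the rewrite author's own statement) =====
-- stated objective: alternative
-- what changed: Replaces A's single incremental pass that mutates a dict accumulator (setdefault+append) with a filter/dedup/collect decomposition: extract each option's key once, dedup the truthy keys in first-occurrence order, then build each group by one collecting scan per key.
import Mathlib
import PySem

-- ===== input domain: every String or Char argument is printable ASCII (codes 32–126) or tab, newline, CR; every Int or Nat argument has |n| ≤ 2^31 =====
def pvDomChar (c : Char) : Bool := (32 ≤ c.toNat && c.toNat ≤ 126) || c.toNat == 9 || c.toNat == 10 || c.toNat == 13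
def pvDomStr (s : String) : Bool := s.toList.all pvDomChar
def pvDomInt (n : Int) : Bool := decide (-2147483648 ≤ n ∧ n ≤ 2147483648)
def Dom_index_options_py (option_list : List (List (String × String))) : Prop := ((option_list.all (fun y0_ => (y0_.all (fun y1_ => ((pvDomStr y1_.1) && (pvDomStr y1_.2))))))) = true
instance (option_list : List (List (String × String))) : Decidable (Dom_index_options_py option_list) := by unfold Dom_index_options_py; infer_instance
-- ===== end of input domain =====

-- B groups by a filter-dedup-collect decomposition (first-occurrence key order, per-key scans)
-- instead of A's single incremental dict-building pass; objective: alternative, same results.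

-- ===== PORT A =====
-- one pass, mapping.setdefault(prod, []).append(opt) on a dict accumulator
def index_options_py (option_list : List (List (String × String))) : List (String × List (List (String × String))) :=
  (option_list.foldl
    (fun mapping opt =>
      match (PySem.Dict.ofList opt).get? "fin_prdt_cd" with
      | none => mapping
      | some prod =>
          if prod = "" then mapping
          else mapping.modify prod [] (fun l => l ++ [opt]))
    PySem.Dict.empty).items

-- ===== PORT B =====
-- keyed pairs, first-occurrence dedup of truthy keys, then one collecting scan per key
def index_options_py_alt (option_list : List (List (String × String))) : List (String × List (List (String × String))) :=
  let keyed := option_list.map (fun opt => ((PySem.Dict.ofList opt).get? "fin_prdt_cd", opt))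
  let keys := PySem.List.dedup (keyed.filterMap (fun p =>
    match p.1 with
    | none => none
    | some k => if k = "" then none else some k))
  keys.map (fun k => (k, (keyed.filter (fun p => p.1 == some k)).map (fun p => p.2)))

-- ===== PRECONDITION & SPEC =====
def Spec_index_options_py (option_list : List (List (String × String))) (out : List (String × List (List (String × String)))) : Prop := out = index_options_py_alt option_list
instance (option_list : List (List (String × String))) (out : List (String × List (List (String × String)))) : Decidable (Spec_index_options_py option_list out) := by unfold Spec_index_options_py; infer_instance

-- ===== CLAIM (what is proved, stated in full; the proofs are below) =====
def Claim_equal_index_options_py : Prop := ∀ (option_list : List (List (String × String))), Dom_index_options_py option_list → Spec_index_options_py option_list (index_options_py option_list)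

-- ===== LEMMAS AND PROOFS =====

-- proof-side names for the pieces of B
def pvKey (opt : List (String × String)) : Option String :=
  (PySem.Dict.ofList opt).get? "fin_prdt_cd"

def pvTKey (x : Option String) : Option String :=
  match x with
  | none => none
  | some k => if k = "" then none else some k

def pvKeyed (l : List (List (String × String))) : List (Option String × List (String × String)) :=
  l.map (fun opt => (pvKey opt, opt))

def pvKeys (l : List (List (String × String))) : List String :=
  PySem.List.dedup ((pvKeyed l).filterMap (fun p => pvTKey p.1))
-- (the filterMap lambda above is definitionally the inline match in index_options_py_alt)

def pvEntry (l : List (List (String × String))) (k : String) : List (List (String × String)) :=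
  ((pvKeyed l).filter (fun p => p.1 == some k)).map (fun p => p.2)

def pvB (l : List (List (String × String))) : List (String × List (List (String × String))) :=
  (pvKeys l).map (fun k => (k, pvEntry l k))

theorem alt_eq_pvB (l : List (List (String × String))) : index_options_py_alt l = pvB l := rfl

-- an element of pvKeys is a nonempty key of some keyed pair
theorem mem_pvKeys {l : List (List (String × String))} {k : String}
    (h : k ∈ pvKeys l) : k ≠ "" ∧ some k ∈ (pvKeyed l).map (fun p => p.1) := by
  simp only [pvKeys, PySem.List.dedup_eq_ofList, PySem.Set.mem_ofList, List.mem_filterMap] at h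
  obtain ⟨p, hp, ht⟩ := h
  rcases p1 : p.1 with _ | k0 <;> rw [p1] at ht <;> simp only [pvTKey] at ht
  · exact absurd ht (by simp)
  · by_cases h0 : k0 = "" <;> simp [h0] at ht
    subst ht
    exact ⟨h0, List.mem_map.mpr ⟨p, hp, p1⟩⟩

theorem not_mem_pvKeys_entry {l : List (List (String × String))} {k : String}
    (hne : k ≠ "") (h : k ∉ pvKeys l) : pvEntry l k = [] := by
  unfold pvEntry
  rw [List.filter_eq_nil_iff.mpr, List.map_nil]
  intro p hp hbeq
  have hp1 : p.1 = some k := by simpa using hbeq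
  apply h
  simp only [pvKeys, PySem.List.dedup_eq_ofList, PySem.Set.mem_ofList, List.mem_filterMap]
  exact ⟨p, hp, by simp [hp1, pvTKey, hne]⟩

-- find? on a key-indexed map
theorem find_map_keys (keys : List String) (f : String → List (List (String × String))) (s : String) :
    List.find? (fun p => p.1 == s) (keys.map (fun k => (k, f k))) =
      if s ∈ keys then some (s, f s) else none := by
  induction keys with
  | nil => simp
  | cons k ks ih =>
      by_cases hk : k = s
      · subst hk; simp
      · simp [hk, ih, Ne.symm hk]

theorem any_map_keys (keys : List String) (f : String → List (List (String × String))) (s : String) :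
    ((keys.map (fun k => (k, f k))).any (fun p => p.1 == s)) = decide (s ∈ keys) := by
  induction keys with
  | nil => simp
  | cons k ks ih =>
      by_cases hk : k = s
      · simp [hk, ih]
      · have h1 : (k == s) = false := by simp [hk]
        have h2 : decide (s = k) = false := by simp [Ne.symm hk]
        simp [h1, h2, ih]

-- appending one option on the B side
theorem pvKeyed_append (l : List (List (String × String))) (o : List (String × String)) :
    pvKeyed (l ++ [o]) = pvKeyed l ++ [(pvKey o, o)] := by
  simp [pvKeyed]

theorem pvKeys_append_none (l : List (List (String × String))) (o : List (String × String))
    (h : pvTKey (pvKey o) = none) : pvKeys (l ++ [o]) = pvKeys l := by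
  simp [pvKeys, pvKeyed_append, List.filterMap_append, h]

theorem pvKeys_append_some (l : List (List (String × String))) (o : List (String × String))
    (s : String) (h : pvTKey (pvKey o) = some s) :
    pvKeys (l ++ [o]) = if (pvKeys l).contains s then pvKeys l else pvKeys l ++ [s] := by
  simp [pvKeys, pvKeyed_append, List.filterMap_append, h,
    PySem.List.dedup_eq_ofList, PySem.Set.ofList, List.foldl_append, PySem.Set.add]

theorem pvEntry_append (l : List (List (String × String))) (o : List (String × String)) (k : String) :
    pvEntry (l ++ [o]) k = pvEntry l k ++ (if pvKey o == some k then [o] else []) := by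
  cases h : (pvKey o == some k) <;>
    simp [pvEntry, pvKeyed_append, List.filter_append, h]

-- the loop invariant: A's accumulator after the prefix l is exactly the dict with items pvB l
theorem main_inv (l : List (List (String × String))) :
    l.foldl
      (fun mapping opt =>
        match (PySem.Dict.ofList opt).get? "fin_prdt_cd" with
        | none => mapping
        | some prod =>
            if prod = "" then mapping
            else mapping.modify prod [] (fun l => l ++ [opt]))
      PySem.Dict.empty = PySem.Dict.mk (pvB l) := by
  induction l using List.reverseRecOn with
  | nil => rfl
  | append_singleton l o ih =>
      rw [List.foldl_append, List.foldl_cons, List.foldl_nil, ih]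
      have hscrut : (PySem.Dict.ofList o).get? "fin_prdt_cd" = pvKey o := rfl
      rw [hscrut]
      have hent := pvEntry_append l o
      rcases hk : pvKey o with _ | prod <;> dsimp only
      · -- no key: A skips, B's keys and entries are unchanged: A skips, B's keys and entries are unchanged
        have hkeys := pvKeys_append_none l o (by simp [hk, pvTKey])
        rw [hk] at hent
        simp only [pvB, hkeys]
        congr 1
        apply List.map_congr_left
        intro k hkmem
        rw [hent k]
        simp
      · by_cases hemp : prod = ""
        · -- empty key: skipped by A, not truthy for B
          subst hemp
          have hkeys := pvKeys_append_none l o (by simp [hk, pvTKey])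
          rw [hk] at hent
          rw [if_pos rfl]
          simp only [pvB, hkeys]
          congr 1
          apply List.map_congr_left
          intro k hkmem
          rw [hent k]
          have hkne := (mem_pvKeys hkmem).1
          simp [Ne.symm hkne]
        · have hkeys := pvKeys_append_some l o prod (by simp [hk, pvTKey, hemp])
          rw [hk] at hent
          rw [if_neg hemp]
          unfold PySem.Dict.modify PySem.Dict.insert PySem.Dict.getD PySem.Dict.get? PySem.Dict.contains
          simp only [pvB, any_map_keys, find_map_keys]
          by_cases hmem : prod ∈ pvKeys l
          · -- existing key: A overwrites in place; B keeps the same key list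
            have hc : (pvKeys l).contains prod = true := by simpa using hmem
            rw [hkeys, if_pos hc, if_pos (by simp [hmem] : decide (prod ∈ pvKeys l) = true), if_pos hmem]
            simp only [Option.map_some, Option.getD_some]
            congr 1
            rw [List.map_map]
            apply List.map_congr_left
            intro k hkmem
            rw [hent k]
            by_cases hkp : k = prod
            · subst hkp; simp
            · simp [hkp, Ne.symm hkp]
          · -- new key: both sides append it at the end
            have hc : (pvKeys l).contains prod = false := by simpa using hmem
            rw [hkeys, if_neg (show ¬(decide (prod ∈ pvKeys l) = true) by simp [hmem]),
              if_neg (show ¬((pvKeys l).contains prod = true) by simp [hmem]), if_neg hmem]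
            simp only [Option.map_none, Option.getD_none, List.map_append, List.map_cons, List.map_nil]
            congr 1
            congr 1
            · apply List.map_congr_left
              intro k hkmem
              rw [hent k]
              have hkp : k ≠ prod := fun h => hmem (h ▸ hkmem)
              simp [Ne.symm hkp]
            · rw [hent prod, not_mem_pvKeys_entry hemp hmem]
              simp

-- ===== VERDICT (by name: the statement is the Claim_ definition above) =====
theorem index_options_py_spec : Claim_equal_index_options_py := by
  intro l _
  show index_options_py l = index_options_py_alt l
  rw [alt_eq_pvB]
  unfold index_options_py
  rw [main_inv]
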